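-- pv_equiv track=rewrite | github.com/istillmissyou/algo | sleight_hand.py | sleight_of_hand
-- ===== SOURCE A (Python) =====
-- from typing import List, Tuple
--
-- PLAYERS = 2
--
-- def sleight_of_hand(clicks: int, symbols: List[str]) -> int:
--     del_symbols = set()
--     symbol_keys = {x: 0 for x in set(symbols) if x != '.'}
--     players_clicks = clicks * PLAYERS
--     for symbol in symbols:
--         if symbol != '.' and symbol not in del_symbols:
--             symbol_keys[symbol] += 1
--             if symbol_keys[symbol] > players_clicks:
--                 del_symbols.add(symbol)
--                 del symbol_keys[symbol]
--     return len(symbol_keys)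
-- ===== SOURCE B (Python) =====
-- from typing import List
--
-- PLAYERS = 2
--
-- def sleight_of_hand(clicks: int, symbols: List[str]) -> int:
--     limit = clicks * PLAYERS
--     remaining = [x for x in symbols if x != '.']
--     total = 0
--     while remaining:
--         head = remaining[0]
--         if remaining.count(head) <= limit:
--             total += 1
--         remaining = [x for x in remaining if x != head]
--     return total
-- ===== Notes on version B (the rewrite author's own statement) =====
-- stated objective: alternative
-- what changed: Drops the frequency dict and eviction set entirely: B repeatedly takes the first remaining non-'.' symbol, counts its occurrences with a list scan, and deletes all its occurrences, one distinct symbol per round, instead of A's single pass maintaining per-key counters with live threshold eviction.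
import Mathlib
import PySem

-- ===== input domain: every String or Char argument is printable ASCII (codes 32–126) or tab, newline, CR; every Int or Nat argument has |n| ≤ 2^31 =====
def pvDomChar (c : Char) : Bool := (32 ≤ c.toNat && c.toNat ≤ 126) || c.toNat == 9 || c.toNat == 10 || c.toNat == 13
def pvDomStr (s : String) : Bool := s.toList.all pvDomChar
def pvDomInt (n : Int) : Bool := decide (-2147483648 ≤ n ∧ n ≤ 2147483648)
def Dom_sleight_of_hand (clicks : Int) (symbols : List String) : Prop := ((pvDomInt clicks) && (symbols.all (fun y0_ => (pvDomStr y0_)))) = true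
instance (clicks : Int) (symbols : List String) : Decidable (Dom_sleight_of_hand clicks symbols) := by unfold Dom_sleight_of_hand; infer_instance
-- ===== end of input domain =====

-- B replaces A's single pass over a counter dict with live eviction by a
-- dict-free distinct-extraction loop: take the first remaining symbol, count it
-- by a list scan, delete all its occurrences, repeat (objective: alternative).

def PLAYERS : Int := 2

-- ===== PORT A =====
-- loop body: 'if symbol != "." and symbol not in del_symbols: …'
-- (symbol_keys[symbol] is ported as getD _ 0: the key is always present when read,
-- so the total lookup is exact here)
def shStep (playersClicks : Int) (st : PySem.Set String × PySem.Dict String Int)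
    (symbol : String) : PySem.Set String × PySem.Dict String Int :=
  if symbol ≠ "." ∧ ¬ (PySem.Set.contains st.1 symbol = true) then
    let v := st.2.getD symbol 0 + 1
    let keys := st.2.insert symbol v
    if playersClicks < v then (PySem.Set.add st.1 symbol, keys.erase symbol)
    else (st.1, keys)
  else st

def sleight_of_hand (clicks : Int) (symbols : List String) : Int :=
  let delSymbols : PySem.Set String := PySem.Set.empty
  -- {x: 0 for x in set(symbols) if x != '.'} (set-iteration order is only consumed
  -- through len of the final dict, which is order-independent)
  let symbolKeys : PySem.Dict String Int :=
    ((PySem.Set.ofList symbols).filter (fun x => x != ".")).foldl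
      (fun d x => d.insert x 0) PySem.Dict.empty
  let playersClicks := clicks * PLAYERS
  (((symbols.foldl (shStep playersClicks) (delSymbols, symbolKeys)).2.size : Nat) : Int)

-- ===== PORT B =====
-- the while loop: head = remaining[0]; if remaining.count(head) <= limit: total += 1;
-- remaining = [x for x in remaining if x != head]
def shbLoop (limit : Int) (total : Int) (remaining : List String) : Int :=
  match remaining with
  | [] => total
  | head :: t =>
    let total' := if (((head :: t).count head : Nat) : Int) ≤ limit then total + 1 else total
    shbLoop limit total' ((head :: t).filter (fun x => decide (x ≠ head)))
  termination_by remaining.length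
  decreasing_by
    simp only [List.filter_cons, decide_not, List.length_cons]
    have := List.length_filter_le (fun x => !decide (x = head)) t
    simp at *
    omega

def sleight_of_hand_alt (clicks : Int) (symbols : List String) : Int :=
  let limit := clicks * PLAYERS
  let remaining := symbols.filter (fun x => decide (x ≠ "."))
  shbLoop limit 0 remaining

-- ===== PRECONDITION & SPEC =====
def Spec_sleight_of_hand (clicks : Int) (symbols : List String) (out : Int) : Prop := out = sleight_of_hand_alt clicks symbols
instance (clicks : Int) (symbols : List String) (out : Int) : Decidable (Spec_sleight_of_hand clicks symbols out) := by unfold Spec_sleight_of_hand; infer_instance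

-- ===== CLAIM (what is proved, stated in full; the proofs are below) =====
def Claim_equal_sleight_of_hand : Prop := ∀ (clicks : Int) (symbols : List String), Dom_sleight_of_hand clicks symbols → Spec_sleight_of_hand clicks symbols (sleight_of_hand clicks symbols)

-- ===== LEMMAS AND PROOFS =====

-- a key is still alive after processing prefix p iff its count in p is 0 or within the limit
def predI (L : Int) (p : List String) (x : String) : Bool :=
  (p.count x == 0) || decide ((p.count x : Int) ≤ L)

-- the dict's items after processing prefix p
def reprL (L : Int) (p : List String) (K : List String) : List (String × Int) :=
  (K.filter (predI L p)).map (fun x => (x, (p.count x : Int)))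

lemma count_snoc_self (p : List String) (s : String) :
    (p ++ [s]).count s = p.count s + 1 := by
  simp [List.count_append]

lemma count_snoc_ne (p : List String) {s x : String} (h : ¬ s = x) :
    (p ++ [s]).count x = p.count x := by
  simp [List.count_append, List.count_singleton, h]

lemma predI_snoc_ne (L : Int) (p : List String) {s x : String} (h : ¬ s = x) :
    predI L (p ++ [s]) x = predI L p x := by
  unfold predI
  rw [count_snoc_ne p h]

lemma predI_false (L : Int) (p : List String) (x : String)
    (h1 : p.count x ≠ 0) (h2 : ¬ ((p.count x : Int) ≤ L)) : predI L p x = false := by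
  unfold predI
  have hb : (p.count x == 0) = false := by simp [h1]
  rw [hb, decide_eq_false h2]
  rfl

lemma repr_eq (L : Int) (K p p' : List String)
    (h : ∀ x ∈ K, predI L p x = predI L p' x ∧ (predI L p x = true → p.count x = p'.count x)) :
    reprL L p K = reprL L p' K := by
  unfold reprL
  rw [List.filter_congr (fun x hx => (h x hx).1)]
  apply List.map_congr_left
  intro x hx
  rw [List.mem_filter] at hx
  have hx2 : predI L p x = true := by rw [(h x hx.1).1]; exact hx.2
  rw [(h x hx.1).2 hx2]

lemma getD_repr (L : Int) (p K : List String) (hK : K.Nodup) (x : String)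
    (hx : x ∈ K) (hp : predI L p x = true) :
    (PySem.Dict.mk (reprL L p K)).getD x 0 = (p.count x : Int) := by
  apply PySem.Dict.getD_of_mem_items
  · unfold reprL
    exact List.mem_map_of_mem (List.mem_filter.mpr ⟨hx, hp⟩)
  · show (List.map Prod.fst _).Nodup
    unfold reprL
    rw [List.map_map]
    have : (Prod.fst ∘ fun x => (x, (p.count x : Int))) = id := rfl
    rw [this, List.map_id]
    exact hK.filter _

lemma contains_repr (L : Int) (p K : List String) (x : String)
    (hx : x ∈ K) (hp : predI L p x = true) :
    (PySem.Dict.mk (reprL L p K)).contains x = true := by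
  rw [PySem.Dict.contains_iff_mem_keys]
  show x ∈ List.map Prod.fst _
  unfold reprL
  rw [List.map_map]
  have : (Prod.fst ∘ fun x => (x, (p.count x : Int))) = id := rfl
  rw [this, List.map_id]
  exact List.mem_filter.mpr ⟨hx, hp⟩

lemma filter_map_erase (l : List (String × Int)) (s : String) (v : Int) :
    (l.map (fun p => if (p.1 == s) = true then (s, v) else p)).filter (fun q => !(q.1 == s))
      = l.filter (fun q => !(q.1 == s)) := by
  induction l with
  | nil => rfl
  | cons q t ih => by_cases h : q.1 = s <;> simp [h] <;> simpa using ih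

-- erase s after an insert at s deletes s's entry and leaves the rest untouched
lemma erase_insert_items (d : PySem.Dict String Int) (s : String) (v : Int) :
    ((d.insert s v).erase s).items = d.items.filter (fun q => !(q.1 == s)) := by
  cases d with
  | mk l =>
    show (PySem.Dict.erase (PySem.Dict.insert _ s v) s).items = _
    unfold PySem.Dict.erase PySem.Dict.insert
    split
    · simpa using filter_map_erase l s v
    · simp

-- MAIN INVARIANT: running A's loop over r from the state reached after prefix p
-- yields the dict described by reprL over p ++ r.
lemma loop_inv (L : Int) (K : List String) (hK : K.Nodup) (hdot : "." ∉ K)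
    (r : List String) (p : List String)
    (hmem : ∀ x ∈ r, x ≠ "." → x ∈ K)
    (delS : PySem.Set String)
    (hdel : ∀ x, x ∈ delS ↔ x ∈ K ∧ 1 ≤ p.count x ∧ L < (p.count x : Int))
    (d : PySem.Dict String Int)
    (hd : d = PySem.Dict.mk (reprL L p K)) :
    (r.foldl (shStep L) (delS, d)).2 = PySem.Dict.mk (reprL L (p ++ r) K) := by
  induction r generalizing p delS d with
  | nil => simpa using hd
  | cons s r' ih =>
    have happend : p ++ s :: r' = (p ++ [s]) ++ r' := by simp
    rw [happend, List.foldl_cons]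
    by_cases hs : s = "."
    · -- a '.' is skipped; counts of every x ∈ K are unchanged
      have hstep : shStep L (delS, d) s = (delS, d) := by
        unfold shStep; simp [hs]
      rw [hstep]
      apply ih (p ++ [s]) (fun x hx hne => hmem x (List.mem_cons_of_mem _ hx) hne)
      · intro x
        rw [hdel x]
        by_cases hxK : x ∈ K
        · have hxs : ¬ s = x := by rintro rfl; exact hdot (hs ▸ hxK)
          rw [count_snoc_ne p hxs]
        · simp [hxK]
      · rw [hd]
        congr 1
        apply repr_eq
        intro x hx
        have hxs : ¬ s = x := by rintro rfl; exact hdot (hs ▸ hx)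
        exact ⟨(predI_snoc_ne L p hxs).symm, fun _ => (count_snoc_ne p hxs).symm⟩
    · have hsK : s ∈ K := hmem s List.mem_cons_self hs
      by_cases hdl : s ∈ delS
      · -- s already evicted: skipped; its count grows but stays over the limit
        have hcon : PySem.Set.contains delS s = true := by
          rw [PySem.Set.contains_iff]; exact hdl
        have hstep : shStep L (delS, d) s = (delS, d) := by
          unfold shStep; simp [hdl]
        obtain ⟨-, hc1, hcL⟩ := (hdel s).mp hdl
        rw [hstep]
        apply ih (p ++ [s]) (fun x hx hne => hmem x (List.mem_cons_of_mem _ hx) hne)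
        · intro x
          rw [hdel x]
          by_cases hxs : s = x
          · subst hxs
            rw [count_snoc_self]
            constructor
            · rintro ⟨h1, -, -⟩
              exact ⟨h1, by omega, by push_cast; push_cast at hcL; omega⟩
            · rintro ⟨h1, -, -⟩; exact ⟨h1, hc1, hcL⟩
          · rw [count_snoc_ne p hxs]
        · rw [hd]
          congr 1
          apply repr_eq
          intro x hx
          by_cases hxs : s = x
          · subst hxs
            have hf1 : predI L p s = false :=
              predI_false L p s (by omega) (by omega)
            have hf2 : predI L (p ++ [s]) s = false := by
              have h1 : (p ++ [s]).count s ≠ 0 := by rw [count_snoc_self]; omega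
              have h2 : ¬ (((p ++ [s]).count s : Int) ≤ L) := by
                rw [count_snoc_self]; push_cast; push_cast at hcL; omega
              exact predI_false L (p ++ [s]) s h1 h2
            exact ⟨hf1.trans hf2.symm, fun h => absurd h (by simp [hf1])⟩
          · exact ⟨(predI_snoc_ne L p hxs).symm, fun _ => (count_snoc_ne p hxs).symm⟩
      · -- s is live: incremented, then possibly evicted
        have hcon : ¬ PySem.Set.contains delS s = true := by
          simp only [PySem.Set.contains_iff]; exact hdl
        have hnot : ¬ (s ∈ K ∧ 1 ≤ p.count s ∧ L < (p.count s : Int)) :=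
          fun h => hdl ((hdel s).mpr h)
        have hcases : p.count s = 0 ∨ (p.count s : Int) ≤ L := by
          by_cases h0 : p.count s = 0
          · exact Or.inl h0
          · right
            by_contra hgt
            exact hnot ⟨hsK, by omega, by omega⟩
        have hpred : predI L p s = true := by
          unfold predI
          rcases hcases with h | h <;> simp [h]
        have hget : d.getD s 0 = (p.count s : Int) := by
          rw [hd]; exact getD_repr L p K hK s hsK hpred
        have hcontains : d.contains s = true := by
          rw [hd]; exact contains_repr L p K s hsK hpred
        have hstep : shStep L (delS, d) s =
            (if L < (p.count s : Int) + 1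
              then (PySem.Set.add delS s, (d.insert s ((p.count s : Int) + 1)).erase s)
              else (delS, d.insert s ((p.count s : Int) + 1))) := by
          unfold shStep
          rw [if_pos ⟨hs, hcon⟩]
          simp only [hget]
        by_cases hover : L < (p.count s : Int) + 1
        · -- evicted now
          have hfS : predI L (p ++ [s]) s = false := by
            have h1 : (p ++ [s]).count s ≠ 0 := by rw [count_snoc_self]; omega
            have h2 : ¬ (((p ++ [s]).count s : Int) ≤ L) := by
              rw [count_snoc_self]; push_cast; omega
            exact predI_false L (p ++ [s]) s h1 h2
          rw [hstep, if_pos hover]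
          apply ih (p ++ [s]) (fun x hx hne => hmem x (List.mem_cons_of_mem _ hx) hne)
          · intro x
            rw [PySem.Set.mem_add, hdel x]
            by_cases hxs : s = x
            · subst hxs
              rw [count_snoc_self]
              constructor
              · intro _
                exact ⟨hsK, by omega, by push_cast; omega⟩
              · intro _; right; rfl
            · rw [count_snoc_ne p hxs]
              constructor
              · rintro (h | h)
                · exact h
                · exact absurd h.symm hxs
              · intro h; left; exact h
          · apply PySem.Dict.ext
            rw [hd, erase_insert_items]
            show (reprL L p K).filter _ = reprL L (p ++ [s]) K
            unfold reprL
            rw [List.filter_map]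
            have hc : ((fun q : String × Int => !(q.1 == s)) ∘ (fun x => (x, (p.count x : Int))))
                = (fun x : String => !(x == s)) := rfl
            rw [hc, List.filter_filter]
            have hfeq : K.filter (fun a => !(a == s) && predI L p a)
                = K.filter (predI L (p ++ [s])) := by
              apply List.filter_congr
              intro x hx
              by_cases hxs : x = s
              · subst hxs
                simp [hfS]
              · have hb : (x == s) = false := by simp [hxs]
                rw [predI_snoc_ne L p (fun h => hxs h.symm)]
                simp [hb]
            rw [hfeq]
            apply List.map_congr_left
            intro x hx
            rw [List.mem_filter] at hx
            have hxs : ¬ s = x := by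
              intro h
              rw [← h] at hx
              exact absurd hx.2 (by simp [hfS])
            rw [count_snoc_ne p hxs]
        · -- still within the limit
          rw [hstep, if_neg hover]
          apply ih (p ++ [s]) (fun x hx hne => hmem x (List.mem_cons_of_mem _ hx) hne)
          · intro x
            rw [hdel x]
            by_cases hxs : s = x
            · subst hxs
              rw [count_snoc_self]
              constructor
              · rintro ⟨h1, h2, h3⟩; exact absurd ⟨h1, h2, h3⟩ hnot
              · rintro ⟨-, -, h3⟩; exfalso; push_cast at h3; omega
            · rw [count_snoc_ne p hxs]
          · apply PySem.Dict.ext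
            rw [PySem.Dict.items_insert_of_contains _ _ hcontains, hd]
            show (reprL L p K).map _ = reprL L (p ++ [s]) K
            unfold reprL
            rw [List.map_map]
            have hfeq : K.filter (predI L p) = K.filter (predI L (p ++ [s])) := by
              apply List.filter_congr
              intro x hx
              by_cases hxs : s = x
              · subst hxs
                rw [hpred]
                unfold predI
                rw [count_snoc_self]
                have h2 : (((p.count s + 1 : Nat)) : Int) ≤ L := by push_cast; omega
                rw [decide_eq_true h2]
                simp
              · rw [predI_snoc_ne L p hxs]
            rw [hfeq]
            apply List.map_congr_left
            intro x hx
            by_cases hxs : x = s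
            · subst hxs
              have hb : (x == x) = true := by simp
              simp only [Function.comp_apply, hb, if_pos]
              rw [count_snoc_self]
              push_cast
              rfl
            · have hb : (x == s) = false := by simp [hxs]
              simp only [Function.comp_apply, hb]
              rw [count_snoc_ne p (fun h => hxs h.symm)]
              simp

-- the initial dict {x: 0 for x in K} as reprL over the empty prefix
lemma init_dict (K : List String) (hK : K.Nodup) (L : Int) :
    K.foldl (fun d x => d.insert x 0) PySem.Dict.empty = PySem.Dict.mk (reprL L [] K) := by
  apply PySem.Dict.ext
  have h := PySem.Dict.items_foldl_insert_fresh K (fun x => x) (fun _ => (0 : Int))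
    PySem.Dict.empty (fun a _ => PySem.Dict.contains_empty a) (by simpa using hK)
  simp only [] at h
  rw [h]
  show PySem.Dict.empty.items ++ K.map (fun a => (a, 0)) = reprL L [] K
  unfold reprL
  have hfeq : K.filter (predI L []) = K := by
    apply List.filter_eq_self.mpr
    intro x _
    unfold predI; simp
  rw [hfeq]
  rfl

-- set(filter) = filter(set) (first-occurrence order)
lemma ofList_filter (q : String → Bool) (l : List String) :
    PySem.Set.ofList (l.filter q) = (PySem.Set.ofList l).filter q := by
  induction l with
  | nil => rfl
  | cons x t ih =>
    by_cases h : q x = true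
    · rw [List.filter_cons_of_pos h, PySem.Set.ofList_cons, PySem.Set.ofList_cons, ih]
      show _ :: PySem.Set.discard ((PySem.Set.ofList t).filter q) x
          = List.filter q (x :: PySem.Set.discard (PySem.Set.ofList t) x)
      rw [List.filter_cons_of_pos h]
      unfold PySem.Set.discard
      rw [List.filter_filter, List.filter_filter]
      congr 1
      apply List.filter_congr
      intro y _
      exact Bool.and_comm _ _
    · rw [List.filter_cons_of_neg h, PySem.Set.ofList_cons, ih]
      show _ = List.filter q (x :: PySem.Set.discard (PySem.Set.ofList t) x)
      rw [List.filter_cons_of_neg h]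
      unfold PySem.Set.discard
      rw [List.filter_filter]
      apply List.filter_congr
      intro y _
      by_cases hyx : y = x
      · subst hyx
        have hb : (y == y) = true := by simp
        rw [hb]
        simp [h]
      · have hb : (y == x) = false := by simp [hyx]
        rw [hb]
        simp

-- B's loop computes: total + number of distinct symbols of xs whose count is within L
lemma shbLoop_eq (L : Int) (n : Nat) (xs : List String) (hn : xs.length ≤ n) (total : Int) :
    shbLoop L total xs
      = total + ((PySem.Set.ofList xs).countP
          (fun x => decide ((xs.count x : Int) ≤ L)) : Nat) := by
  induction n generalizing xs total with
  | zero =>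
    have : xs = [] := List.length_eq_zero_iff.mp (Nat.le_zero.mp hn)
    subst this
    simp [shbLoop]
  | succ m ih =>
    match xs with
    | [] => simp [shbLoop]
    | h :: t =>
      rw [shbLoop]
      have hlen : ((h :: t).filter (fun x => decide (x ≠ h))).length ≤ m := by
        have h1 : (h :: t).filter (fun x => decide (x ≠ h)) = t.filter (fun x => decide (x ≠ h)) := by
          simp [List.filter_cons]
        rw [h1]
        have := List.length_filter_le (fun x => decide (x ≠ h)) t
        simp only [List.length_cons] at hn
        omega
      rw [ih _ hlen]
      -- rewrite the recursive part
      set rest := (h :: t).filter (fun x => decide (x ≠ h)) with hrest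
      have hofl : PySem.Set.ofList rest = (PySem.Set.ofList (h :: t)).filter (fun x => decide (x ≠ h)) :=
        ofList_filter _ _
      have hcnt : ∀ x ∈ PySem.Set.ofList rest, rest.count x = (h :: t).count x := by
        intro x hx
        rw [PySem.Set.mem_ofList, hrest, List.mem_filter] at hx
        rw [hrest]
        exact List.count_filter (by simpa using hx.2)
      have hcongr : (PySem.Set.ofList rest).countP (fun x => decide ((rest.count x : Int) ≤ L))
          = (PySem.Set.ofList rest).countP (fun x => decide (((h :: t).count x : Int) ≤ L)) := by
        apply List.countP_congr
        intro x hx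
        rw [hcnt x hx]
      rw [hcongr, hofl]
      -- ofList (h :: t) = h :: D with h ∉ D
      rw [PySem.Set.ofList_cons]
      set D := PySem.Set.discard (PySem.Set.ofList t) h with hD
      have hhD : h ∉ D := by
        intro hmem
        rw [hD] at hmem
        unfold PySem.Set.discard at hmem
        rw [List.mem_filter] at hmem
        simpa using hmem.2
      have hfilter : (h :: D).filter (fun x => decide (x ≠ h)) = D := by
        rw [List.filter_cons_of_neg (by simp)]
        apply List.filter_eq_self.mpr
        intro x hx
        simp only [decide_eq_true_eq]
        intro hxh
        exact hhD (hxh ▸ hx)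
      rw [hfilter, List.countP_cons]
      simp only [decide_eq_true_eq]
      by_cases hc : (((h :: t).count h : Nat) : Int) ≤ L
      · rw [if_pos hc, if_pos hc]
        push_cast
        ring
      · rw [if_neg hc, if_neg hc]
        push_cast
        ring

-- ===== VERDICT (by name: the statement is the Claim_ definition above) =====
theorem sleight_of_hand_spec : Claim_equal_sleight_of_hand := by
  intro clicks symbols _
  unfold Spec_sleight_of_hand sleight_of_hand sleight_of_hand_alt
  simp only []
  set L := clicks * PLAYERS with hL
  set D := PySem.Set.ofList symbols with hD
  set K := D.filter (fun x => x != ".") with hKdef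
  have hKnodup : K.Nodup := (PySem.Set.nodup_ofList symbols).filter _
  have hdot : "." ∉ K := by
    intro h
    rw [hKdef, List.mem_filter] at h
    simpa using h.2
  have hmem : ∀ x ∈ symbols, x ≠ "." → x ∈ K := by
    intro x hx hne
    rw [hKdef, List.mem_filter]
    exact ⟨(PySem.Set.mem_ofList symbols x).mpr hx, by simpa using hne⟩
  have hfold := loop_inv L K hKnodup hdot symbols [] hmem PySem.Set.empty
      (by intro x; simp [PySem.Set.empty]) _ (init_dict K hKnodup L)
  simp only [List.nil_append] at hfold
  rw [hfold]
  show ((PySem.Dict.mk (reprL L symbols K)).size : Int) = _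
  have hsize : (PySem.Dict.mk (reprL L symbols K)).size
      = (K.filter (predI L symbols)).length := by
    show (reprL L symbols K).length = _
    unfold reprL
    rw [List.length_map]
  rw [hsize]
  -- B's side: the distinct-extraction loop counts distinct non-'.' symbols within the limit
  set F := symbols.filter (fun x => decide (x ≠ ".")) with hF
  rw [shbLoop_eq L F.length F le_rfl 0, zero_add]
  have hFK : PySem.Set.ofList F = K := by
    rw [hF, ofList_filter, hKdef, hD]
    apply List.filter_congr
    intro x _
    by_cases h : x = "." <;> simp [h, bne]
  rw [hFK]
  congr 1
  rw [← List.countP_eq_length_filter]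
  apply List.countP_congr
  intro x hx
  rw [hKdef, List.mem_filter] at hx
  have hxne : x ≠ "." := by simpa using hx.2
  have hxmem : x ∈ symbols := (PySem.Set.mem_ofList symbols x).mp (hD ▸ hx.1)
  have hpos : 0 < symbols.count x := List.count_pos_iff.mpr hxmem
  have hcnt : F.count x = symbols.count x := by
    rw [hF]
    exact List.count_filter (by simp [hxne])
  unfold predI
  have h0 : (symbols.count x == 0) = false := by simp; omega
  simp [hcnt, h0]
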